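-- pv_equiv track=rewrite | github.com/kkew3/sat-sudoku | enc.py | basic_filtering
-- ===== SOURCE A (Python) =====
-- import itertools
--
-- def basic_filtering(assigned_encoding, clauses):
--     """
--     Reference: A Sudoku-Solver for Large Puzzles using SAT
--     """
--     asslit = list(itertools.chain.from_iterable(assigned_encoding))
--     revlit = set(~lit for lit in asslit)
--     for clause in clauses:
--         clause_cache = set(clause)
--         for lit in asslit:
--             if lit in clause_cache:
--                 break
--         else:
--             yield [lit for lit in clause if lit not in revlit]
-- ===== SOURCE B (Python) =====
-- import itertools
--
-- def basic_filtering(assigned_encoding, clauses):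
--     assigned = set(itertools.chain.from_iterable(assigned_encoding))
--     for clause in clauses:
--         satisfied = False
--         out = []
--         for lit in clause:
--             if lit in assigned:
--                 satisfied = True
--                 break
--             if ~lit not in assigned:
--                 out.append(lit)
--         if not satisfied:
--             yield out
-- ===== Notes on version B (the rewrite author's own statement) =====
-- stated objective: simpler
-- what changed: B replaces A's two-phase handling of each clause (build a clause set, scan all assigned literals for satisfaction, then a separate filtering comprehension over the clause) with one single pass over the clause's literals against one assigned-literal set, maintaining a satisfied flag and the filtered output together.
import Mathlib
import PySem

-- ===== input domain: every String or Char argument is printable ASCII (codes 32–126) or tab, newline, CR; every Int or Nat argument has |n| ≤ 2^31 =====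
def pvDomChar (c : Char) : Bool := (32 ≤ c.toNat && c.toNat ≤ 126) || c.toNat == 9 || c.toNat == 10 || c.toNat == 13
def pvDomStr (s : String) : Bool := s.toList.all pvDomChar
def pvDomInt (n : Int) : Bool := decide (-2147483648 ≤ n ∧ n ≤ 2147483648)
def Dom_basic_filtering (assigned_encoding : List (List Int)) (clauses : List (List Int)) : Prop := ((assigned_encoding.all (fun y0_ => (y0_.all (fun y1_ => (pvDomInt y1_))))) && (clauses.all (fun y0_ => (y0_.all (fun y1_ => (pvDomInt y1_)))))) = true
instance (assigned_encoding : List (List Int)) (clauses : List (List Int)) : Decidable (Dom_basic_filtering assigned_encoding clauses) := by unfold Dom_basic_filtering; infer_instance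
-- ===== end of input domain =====

-- B fuses A's per-clause satisfaction scan and filtering comprehension into one pass per clause; objective: simpler.
-- A is a generator; the ports return the list of yielded clauses.

-- ===== PORT A =====
def basic_filtering (assigned_encoding : List (List Int)) (clauses : List (List Int)) : List (List Int) :=
  let asslit := assigned_encoding.flatten
  let revlit : PySem.Set Int := PySem.Set.ofList (asslit.map (fun lit => -lit - 1))
  clauses.foldl (fun acc clause =>
    let clause_cache : PySem.Set Int := PySem.Set.ofList clause
    if asslit.any (fun lit => PySem.Set.contains clause_cache lit) then acc
    else acc ++ [clause.filter (fun lit => !(PySem.Set.contains revlit lit))]) []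

-- ===== PORT B =====
-- one pass over a clause: none = satisfied, some out = the filtered literals
def bfClauseLoop (assigned : PySem.Set Int) : List Int → List Int → Option (List Int)
  | [], out => some out
  | lit :: rest, out =>
      if PySem.Set.contains assigned lit then none
      else if !(PySem.Set.contains assigned (-lit - 1)) then bfClauseLoop assigned rest (out ++ [lit])
      else bfClauseLoop assigned rest out

def basic_filtering_alt (assigned_encoding : List (List Int)) (clauses : List (List Int)) : List (List Int) :=
  let assigned : PySem.Set Int := PySem.Set.ofList assigned_encoding.flatten
  clauses.foldl (fun acc clause =>
    match bfClauseLoop assigned clause [] with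
    | none => acc
    | some out => acc ++ [out]) []

-- ===== PRECONDITION & SPEC =====
def Spec_basic_filtering (assigned_encoding : List (List Int)) (clauses : List (List Int)) (out : List (List Int)) : Prop := out = basic_filtering_alt assigned_encoding clauses
instance (assigned_encoding : List (List Int)) (clauses : List (List Int)) (out : List (List Int)) : Decidable (Spec_basic_filtering assigned_encoding clauses out) := by unfold Spec_basic_filtering; infer_instance

-- ===== CLAIM (what is proved, stated in full; the proofs are below) =====
def Claim_equal_basic_filtering : Prop := ∀ (assigned_encoding : List (List Int)) (clauses : List (List Int)), Dom_basic_filtering assigned_encoding clauses → Spec_basic_filtering assigned_encoding clauses (basic_filtering assigned_encoding clauses)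

-- ===== LEMMAS AND PROOFS =====

-- When no literal of the clause is assigned, B's loop keeps exactly the literals whose negation is unassigned.
theorem bfClauseLoop_unsat (S : PySem.Set Int) (c acc : List Int)
    (h : ∀ l ∈ c, l ∉ S) :
    bfClauseLoop S c acc = some (acc ++ c.filter (fun l => !(PySem.Set.contains S (-l - 1)))) := by
  induction c generalizing acc with
  | nil => simp [bfClauseLoop]
  | cons x xs ih =>
    have hx : x ∉ S := h x (by simp)
    have ih' : ∀ acc' : List Int, bfClauseLoop S xs acc' = some (acc' ++ xs.filter (fun l => !(PySem.Set.contains S (-l - 1)))) :=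
      fun acc' => ih acc' (fun l hl => h l (List.mem_cons_of_mem _ hl))
    by_cases hneg : (-x - 1) ∈ S
    · simp [bfClauseLoop, hx, hneg, ih']
    · simp [bfClauseLoop, hx, hneg, ih']

-- When some literal of the clause is assigned, B's loop reports satisfied.
theorem bfClauseLoop_sat (S : PySem.Set Int) (c acc : List Int)
    (h : ∃ l ∈ c, l ∈ S) :
    bfClauseLoop S c acc = none := by
  induction c generalizing acc with
  | nil => simp at h
  | cons x xs ih =>
    obtain ⟨l, hl, hS⟩ := h
    by_cases hx : x ∈ S
    · simp [bfClauseLoop, hx]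
    · have hlxs : l ∈ xs := by
        rcases List.mem_cons.mp hl with rfl | h'
        · exact absurd hS hx
        · exact h'
      simp only [bfClauseLoop]
      rw [if_neg (by simp [hx])]
      split <;> exact ih _ ⟨l, hlxs, hS⟩

theorem contains_ofList (xs : List Int) (a : Int) :
    PySem.Set.contains (PySem.Set.ofList xs) a = xs.contains a := by
  simp [PySem.Set.contains_eq_listContains, List.contains_eq_mem, PySem.Set.mem_ofList]

-- A's per-clause step and B's per-clause step agree for every accumulator and clause.
theorem step_eq (asslit : List Int) (acc : List (List Int)) (clause : List Int) :
    (if asslit.any (fun lit => PySem.Set.contains (PySem.Set.ofList clause) lit) then acc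
     else acc ++ [clause.filter (fun lit =>
       !(PySem.Set.contains (PySem.Set.ofList (asslit.map (fun l => -l - 1))) lit))]) =
    (match bfClauseLoop (PySem.Set.ofList asslit) clause [] with
     | none => acc
     | some out => acc ++ [out]) := by
  by_cases hsat : ∃ l ∈ clause, l ∈ asslit
  · obtain ⟨l, hlc, hla⟩ := hsat
    rw [bfClauseLoop_sat _ _ _ ⟨l, hlc, by simp [PySem.Set.mem_ofList, hla]⟩]
    rw [if_pos]
    exact List.any_eq_true.mpr ⟨l, hla, by simp [hlc]⟩
  · push Not at hsat
    rw [bfClauseLoop_unsat _ _ _ (fun l hl => by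
      simp only [PySem.Set.mem_ofList]; exact hsat l hl)]
    rw [if_neg]
    · simp only [List.nil_append]
      congr 2
      apply List.filter_congr
      intro l hl
      congr 1
      simp only [PySem.Set.contains_eq_listContains, List.contains_eq_mem,
        PySem.Set.mem_ofList, List.mem_map, decide_eq_decide]
      constructor
      · rintro ⟨a, ha, hEq⟩
        have : -l - 1 = a := by omega
        exact this ▸ ha
      · intro h; exact ⟨-l - 1, h, by omega⟩
    · simp only [List.any_eq_true, not_exists]
      rintro x ⟨hx, hmem⟩
      exact absurd (by simpa [contains_ofList] using hmem) (fun h => hsat x h hx)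

-- ===== VERDICT (by name: the statement is the Claim_ definition above) =====
theorem basic_filtering_spec : Claim_equal_basic_filtering := by
  intro ae clauses _
  unfold Spec_basic_filtering basic_filtering basic_filtering_alt
  dsimp only []
  congr 1
  funext acc clause
  exact step_eq ae.flatten acc clause
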